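-- pv_equiv track=rewrite | github.com/jjsohn92/latent_mutExploration | utils/analysis_utils.py | computeRevealedMutType
-- ===== SOURCE A (Python) =====
-- from typing import List, Dict, Tuple, Set
--
-- def computeRevealedMutType(isNotRefactorings:List[bool], isSemanticChanges:List[str], revealedAt:str, modifiedAts:List[str]) -> List:
--     """
--     -> these are on the "first" revealing points
--     Here, semantic change actually refers to semnatic change & not refactoriung
--     Five level:
--     - sc_c, sc_nc
--     - rc_c, rc_nc
--     - nc_nc
--     """
--     #
--     rv_flag = 'c' if revealedAt in modifiedAts else 'nc'
--     chg_status = []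
--     #print ("--", isNotRefactorings, isSemanticChanges)
--     for isNotRefactoring, isSemanticChange in zip(isNotRefactorings, isSemanticChanges):
--         #print ("======", isSemanticChange, isNotRefactoring)
--         if isSemanticChange:
--             if isNotRefactoring: # if we encounter any of this case, then
--                 return f"sc_{rv_flag}", True, True, True, True
--             else:
--                 chg_status.append('rc')
--         else:
--             chg_status.append('nc')
--     if 'rc' in  chg_status:
--         return f'rc_{rv_flag}', False, False, True, True
--     else:
--         #assert rv_flag == 'nc', f"{rv_flag}, {chg_status}"
--         if rv_flag != 'nc': rv_flag = 'nc' # for non-semantic change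
--         return f"nc_{rv_flag}", False, False, False, False
-- ===== SOURCE B (Python) =====
-- def computeRevealedMutType(isNotRefactorings, isSemanticChanges, revealedAt, modifiedAts):
--     pairs = list(zip(isNotRefactorings, isSemanticChanges))
--     if any(sc and nr for nr, sc in pairs):
--         rv_flag = 'c' if revealedAt in modifiedAts else 'nc'
--         return f"sc_{rv_flag}", True, True, True, True
--     if any(sc and not nr for nr, sc in pairs):
--         rv_flag = 'c' if revealedAt in modifiedAts else 'nc'
--         return f"rc_{rv_flag}", False, False, True, True
--     return "nc_nc", False, False, False, False
-- ===== Notes on version B (the rewrite author's own statement) =====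
-- stated objective: simpler
-- what changed: Replaces the accumulating chg_status loop with two short-circuiting any() predicates over the zipped pairs and a literal nc_nc fallback (the nc branch always forces the flag to nc), computing the reveal flag only when needed.
import Mathlib
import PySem

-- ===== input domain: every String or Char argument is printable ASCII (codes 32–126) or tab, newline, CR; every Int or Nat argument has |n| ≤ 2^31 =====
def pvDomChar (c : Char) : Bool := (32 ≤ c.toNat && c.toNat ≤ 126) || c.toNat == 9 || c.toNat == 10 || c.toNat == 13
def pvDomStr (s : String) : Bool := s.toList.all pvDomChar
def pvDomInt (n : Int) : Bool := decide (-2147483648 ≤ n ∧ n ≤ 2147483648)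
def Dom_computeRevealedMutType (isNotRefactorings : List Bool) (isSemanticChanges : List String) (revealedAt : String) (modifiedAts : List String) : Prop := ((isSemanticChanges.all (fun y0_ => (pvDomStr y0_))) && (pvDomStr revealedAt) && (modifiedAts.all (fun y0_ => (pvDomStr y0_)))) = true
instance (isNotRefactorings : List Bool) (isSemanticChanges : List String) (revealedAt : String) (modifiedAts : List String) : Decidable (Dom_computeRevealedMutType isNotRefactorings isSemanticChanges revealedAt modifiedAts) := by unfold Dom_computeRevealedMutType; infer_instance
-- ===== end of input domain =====

-- B replaces A's accumulating chg_status loop by two short-circuiting any-scans (simpler decomposition, same behaviour).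

-- ===== PORT A =====
-- the for-loop of A: pairs = zip(isNotRefactorings, isSemanticChanges), accumulator chg_status
def pvLoopA (rv : String) : List (Bool × String) → List String → String × Bool × Bool × Bool × Bool
  | [], chg =>
      if chg.contains "rc" then ("rc_" ++ rv, false, false, true, true)
      else
        let rv' := if rv != "nc" then "nc" else rv
        ("nc_" ++ rv', false, false, false, false)
  | (nr, sc) :: rest, chg =>
      if sc != "" then
        if nr then ("sc_" ++ rv, true, true, true, true)
        else pvLoopA rv rest (chg ++ ["rc"])
      else pvLoopA rv rest (chg ++ ["nc"])

def computeRevealedMutType (isNotRefactorings : List Bool) (isSemanticChanges : List String) (revealedAt : String) (modifiedAts : List String) : String × Bool × Bool × Bool × Bool :=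
  let rv_flag := if modifiedAts.contains revealedAt then "c" else "nc"
  pvLoopA rv_flag (isNotRefactorings.zip isSemanticChanges) []

-- ===== PORT B =====
def computeRevealedMutType_alt (isNotRefactorings : List Bool) (isSemanticChanges : List String) (revealedAt : String) (modifiedAts : List String) : String × Bool × Bool × Bool × Bool :=
  let pairs := isNotRefactorings.zip isSemanticChanges
  if pairs.any (fun p => p.2 != "" && p.1) then
    let rv_flag := if modifiedAts.contains revealedAt then "c" else "nc"
    ("sc_" ++ rv_flag, true, true, true, true)
  else if pairs.any (fun p => p.2 != "" && !p.1) then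
    let rv_flag := if modifiedAts.contains revealedAt then "c" else "nc"
    ("rc_" ++ rv_flag, false, false, true, true)
  else ("nc_nc", false, false, false, false)

-- ===== PRECONDITION & SPEC =====
def Spec_computeRevealedMutType (isNotRefactorings : List Bool) (isSemanticChanges : List String) (revealedAt : String) (modifiedAts : List String) (out : String × Bool × Bool × Bool × Bool) : Prop := out = computeRevealedMutType_alt isNotRefactorings isSemanticChanges revealedAt modifiedAts
instance (isNotRefactorings : List Bool) (isSemanticChanges : List String) (revealedAt : String) (modifiedAts : List String) (out : String × Bool × Bool × Bool × Bool) : Decidable (Spec_computeRevealedMutType isNotRefactorings isSemanticChanges revealedAt modifiedAts out) := by unfold Spec_computeRevealedMutType; infer_instance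

-- ===== CLAIM (what is proved, stated in full; the proofs are below) =====
def Claim_equal_computeRevealedMutType : Prop := ∀ (isNotRefactorings : List Bool) (isSemanticChanges : List String) (revealedAt : String) (modifiedAts : List String), Dom_computeRevealedMutType isNotRefactorings isSemanticChanges revealedAt modifiedAts → Spec_computeRevealedMutType isNotRefactorings isSemanticChanges revealedAt modifiedAts (computeRevealedMutType isNotRefactorings isSemanticChanges revealedAt modifiedAts)

-- ===== LEMMAS AND PROOFS =====

-- characterisation of A's loop for any accumulator
theorem pvLoopA_char (rv : String) (pairs : List (Bool × String)) (chg : List String) :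
    pvLoopA rv pairs chg =
      if pairs.any (fun p => p.2 != "" && p.1) then ("sc_" ++ rv, true, true, true, true)
      else if pairs.any (fun p => p.2 != "" && !p.1) || chg.contains "rc" then
        ("rc_" ++ rv, false, false, true, true)
      else
        ("nc_" ++ (if rv != "nc" then "nc" else rv), false, false, false, false) := by
  induction pairs generalizing chg with
  | nil => simp [pvLoopA]
  | cons p rest ih =>
    obtain ⟨nr, sc⟩ := p
    by_cases hsc : sc = ""
    · subst hsc
      have hc : (chg ++ ["nc"]).contains "rc" = chg.contains "rc" := by simp
      simp only [pvLoopA, ih, hc]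
      simp only [List.any_cons, bne_self_eq_false, Bool.false_and, Bool.false_or]
      simp
    · cases nr with
      | true => simp [pvLoopA, hsc]
      | false =>
        have h : (sc != "") = true := by simp [hsc]
        have hc : (chg ++ ["rc"]).contains "rc" = true := by simp
        simp only [pvLoopA, if_pos h, ih, hc]
        simp only [List.any_cons, h, Bool.and_false, Bool.false_or, Bool.true_and, Bool.or_true]
        simp

-- ===== VERDICT (by name: the statement is the Claim_ definition above) =====
theorem computeRevealedMutType_spec : Claim_equal_computeRevealedMutType := by
  intro nrs scs rv mas _
  unfold Spec_computeRevealedMutType computeRevealedMutType computeRevealedMutType_alt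
  rw [pvLoopA_char]
  by_cases h1 : (nrs.zip scs).any (fun p => p.2 != "" && p.1)
  · simp [h1]
  · by_cases h2 : (nrs.zip scs).any (fun p => p.2 != "" && !p.1)
    · simp [h1, h2]
    · by_cases hm : rv ∈ mas <;> simp [h1, h2, hm]
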